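-- pv_equiv track=rewrite | github.com/yiyan023/Data-Structures | Formation/Call Center.py | process_call_center_actions
-- ===== SOURCE A (Python) =====
-- import collections
--
-- def process_call_center_actions(actions: list[tuple]) -> list:
--     op_queue, call_queue = collections.deque(), collections.deque()
--     res = []
--
--     for cmd, actionId in actions:
--         if cmd == "add_operator" or cmd == "release_operator":
--             op_queue.append(actionId)
--
--         else:
--             # if queue is not empty
--             if call_queue or not op_queue:
--                 call_queue.append(actionId)
--
--             if op_queue:
--                 call = call_queue.popleft() if call_queue else actionId
--                 res.append((call, op_queue.popleft()))
--
--     while call_queue and op_queue: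
--         res.append((call_queue.popleft(), op_queue.popleft()))
--
--     return res
-- ===== SOURCE B (Python) =====
-- def process_call_center_actions(actions: list[tuple]) -> list:
--     ops = [aid for cmd, aid in actions if cmd == "add_operator" or cmd == "release_operator"]
--     calls = [aid for cmd, aid in actions if cmd != "add_operator" and cmd != "release_operator"]
--     return list(zip(calls, ops))
-- ===== Notes on version B (the rewrite author's own statement) =====
-- stated objective: simpler
-- what changed: Replaced the online deque-matching loop plus final drain with two filtering passes that collect operator ids and call ids, returning their positional zip.
import Mathlib
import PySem

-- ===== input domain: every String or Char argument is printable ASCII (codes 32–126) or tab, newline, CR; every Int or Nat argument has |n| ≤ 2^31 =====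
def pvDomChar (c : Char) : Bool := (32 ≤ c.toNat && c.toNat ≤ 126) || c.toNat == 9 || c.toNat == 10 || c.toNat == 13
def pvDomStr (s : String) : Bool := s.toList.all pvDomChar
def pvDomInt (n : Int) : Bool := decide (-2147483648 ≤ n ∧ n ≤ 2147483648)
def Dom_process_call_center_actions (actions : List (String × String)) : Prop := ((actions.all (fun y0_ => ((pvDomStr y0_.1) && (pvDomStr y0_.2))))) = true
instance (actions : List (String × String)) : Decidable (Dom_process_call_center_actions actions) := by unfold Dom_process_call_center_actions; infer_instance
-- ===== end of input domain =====

-- B replaces A's online deque matching + final drain with two filters and a positional zip (simpler).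

-- ===== PORT A =====
-- the final 'while call_queue and op_queue' drain loop
def pccDrain : List String → List String → List (String × String) → List (String × String)
  | c :: cq, o :: oq, res => pccDrain cq oq (res ++ [(c, o)])
  | _, _, res => res

-- one iteration of A's for-loop; state = (op_queue, call_queue, res)
def pccStep (st : List String × List String × List (String × String)) (a : String × String) :
    List String × List String × List (String × String) :=
  let (opq, callq, res) := st
  let (cmd, actionId) := a
  if cmd == "add_operator" || cmd == "release_operator" then
    (opq ++ [actionId], callq, res)
  else
    let callq' := if !callq.isEmpty || opq.isEmpty then callq ++ [actionId] else callq
    match opq with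
    | o :: opqRest =>
        match callq' with
        | c :: callqRest => (opqRest, callqRest, res ++ [(c, o)])
        | [] => (opqRest, [], res ++ [(actionId, o)])
    | [] => (opq, callq', res)

def process_call_center_actions (actions : List (String × String)) : List (String × String) :=
  let st := actions.foldl pccStep ([], [], [])
  pccDrain st.2.1 st.1 st.2.2

-- ===== PORT B =====
def pccIsOp (p : String × String) : Bool := p.1 == "add_operator" || p.1 == "release_operator"

def process_call_center_actions_alt (actions : List (String × String)) : List (String × String) :=
  let ops := (actions.filter pccIsOp).map Prod.snd
  let calls := (actions.filter (fun p => !(pccIsOp p))).map Prod.snd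
  calls.zip ops

-- ===== PRECONDITION & SPEC =====
def Spec_process_call_center_actions (actions : List (String × String)) (out : List (String × String)) : Prop := out = process_call_center_actions_alt actions
instance (actions : List (String × String)) (out : List (String × String)) : Decidable (Spec_process_call_center_actions actions out) := by unfold Spec_process_call_center_actions; infer_instance

-- ===== CLAIM (what is proved, stated in full; the proofs are below) =====
def Claim_equal_process_call_center_actions : Prop := ∀ (actions : List (String × String)), Dom_process_call_center_actions actions → Spec_process_call_center_actions actions (process_call_center_actions actions)

-- ===== LEMMAS AND PROOFS =====

-- the drain loop is exactly zip, appended to res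
theorem pccDrain_eq (cq oq : List String) (res : List (String × String)) :
    pccDrain cq oq res = res ++ cq.zip oq := by
  induction cq generalizing oq res with
  | nil => cases oq <;> simp [pccDrain]
  | cons c cq ih =>
      cases oq with
      | nil => simp [pccDrain]
      | cons o oq => simp [pccDrain, ih]

-- main invariant: from any state, the loop followed by the drain yields
-- res ++ zip (call_queue ++ future calls) (op_queue ++ future operators)
theorem pcc_loop_inv (actions : List (String × String)) :
    ∀ (opq callq : List String) (res : List (String × String)),
    (let st := actions.foldl pccStep (opq, callq, res)
     pccDrain st.2.1 st.1 st.2.2) =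
      res ++ (callq ++ (actions.filter (fun p => !(pccIsOp p))).map Prod.snd).zip
              (opq ++ (actions.filter pccIsOp).map Prod.snd) := by
  induction actions with
  | nil => intro opq callq res; simpa using pccDrain_eq callq opq res
  | cons a rest ih =>
      intro opq callq res
      obtain ⟨cmd, actionId⟩ := a
      by_cases hop : (cmd == "add_operator" || cmd == "release_operator") = true
      · rw [List.foldl_cons,
          show pccStep (opq, callq, res) (cmd, actionId) = (opq ++ [actionId], callq, res) from by
            simp [pccStep, hop]]
        rw [ih]
        rcases (by simpa using hop : cmd = "add_operator" ∨ cmd = "release_operator") with h | h <;>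
          simp [pccIsOp, h, List.append_assoc]
      · have h' : (cmd == "add_operator" || cmd == "release_operator") = false := by
          simpa using hop
        obtain ⟨h1, h2⟩ : ¬cmd = "add_operator" ∧ ¬cmd = "release_operator" := by simpa using h'
        cases opq with
        | nil =>
            rw [List.foldl_cons,
              show pccStep ([], callq, res) (cmd, actionId) = ([], callq ++ [actionId], res) from by
                simp [pccStep, h']]
            rw [ih]
            simp [pccIsOp, h1, h2, List.append_assoc]
        | cons o opqRest =>
            cases callq with
            | nil =>
                rw [List.foldl_cons,
                  show pccStep (o :: opqRest, [], res) (cmd, actionId) =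
                      (opqRest, [], res ++ [(actionId, o)]) from by simp [pccStep, h']]
                rw [ih]
                simp [pccIsOp, h1, h2, List.append_assoc]
            | cons c callqRest =>
                rw [List.foldl_cons,
                  show pccStep (o :: opqRest, c :: callqRest, res) (cmd, actionId) =
                      (opqRest, callqRest ++ [actionId], res ++ [(c, o)]) from by
                    simp [pccStep, h']]
                rw [ih]
                simp [pccIsOp, h1, h2, List.append_assoc]

-- ===== VERDICT (by name: the statement is the Claim_ definition above) =====
theorem process_call_center_actions_spec : Claim_equal_process_call_center_actions := by
  intro actions _
  unfold Spec_process_call_center_actions process_call_center_actions process_call_center_actions_alt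
  simpa using pcc_loop_inv actions [] [] []
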